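-- pv_equiv track=rewrite | github.com/jeddyhuang/Simple-Python-Data-Manipulations | Python Stuff.py | restaurant
-- ===== SOURCE A (Python) =====
-- def restaurant(dict1, dict2, x):
--     temp = set()
--     final = set()
--     for key in dict1:
--         if key <= x:
--             for value in dict1[key]:
--                 temp.add(value)
--     for key in dict2:
--         if key <= x:
--             for value in dict2[key]:
--                 if value in temp:
--                     final.add(value)
--     return final
-- ===== SOURCE B (Python) =====
-- def restaurant(dict1, dict2, x):
--     return {v for k in dict2 if k <= x for v in dict2[k]
--             if any(j <= x and v in dict1[j] for j in dict1)}
-- ===== Notes on version B (the rewrite author's own statement) =====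
-- stated objective: simpler
-- what changed: Drops A's prebuilt temp index set entirely: B is a single comprehension over dict2's qualifying values whose membership test scans dict1 directly with any(), i.e. a direct nested scan instead of A's build-an-index-then-filter two-phase loop.
import Mathlib
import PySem

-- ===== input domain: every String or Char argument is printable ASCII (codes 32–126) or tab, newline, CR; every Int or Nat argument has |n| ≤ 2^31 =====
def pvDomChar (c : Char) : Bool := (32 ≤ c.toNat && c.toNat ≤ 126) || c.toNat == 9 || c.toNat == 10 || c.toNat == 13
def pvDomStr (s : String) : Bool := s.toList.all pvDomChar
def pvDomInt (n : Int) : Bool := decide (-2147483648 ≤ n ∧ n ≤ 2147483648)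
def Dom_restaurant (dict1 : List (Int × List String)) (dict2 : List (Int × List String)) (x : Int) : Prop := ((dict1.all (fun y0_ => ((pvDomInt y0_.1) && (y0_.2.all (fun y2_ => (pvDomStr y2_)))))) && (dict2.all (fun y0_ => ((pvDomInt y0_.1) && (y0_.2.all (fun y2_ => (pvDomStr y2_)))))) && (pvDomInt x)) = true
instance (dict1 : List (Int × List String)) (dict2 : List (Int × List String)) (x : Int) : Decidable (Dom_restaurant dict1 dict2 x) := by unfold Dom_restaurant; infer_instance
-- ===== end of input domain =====

-- B drops A's prebuilt temp index set: it is one comprehension over dict2's qualifying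
-- values whose membership test scans dict1 directly with any() (simpler, no index phase).

-- ===== PORT A =====
def restaurant (dict1 : List (Int × List String)) (dict2 : List (Int × List String)) (x : Int) : List String :=
  let temp : PySem.Set String :=
    dict1.foldl (fun t kv =>
      if kv.1 ≤ x then kv.2.foldl (fun t v => PySem.Set.add t v) t else t) PySem.Set.empty
  dict2.foldl (fun f kv =>
    if kv.1 ≤ x then
      kv.2.foldl (fun f v => if PySem.Set.contains temp v then PySem.Set.add f v else f) f
    else f) PySem.Set.empty

-- ===== PORT B =====
def restaurant_alt (dict1 : List (Int × List String)) (dict2 : List (Int × List String)) (x : Int) : List String :=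
  PySem.Set.ofList
    (((dict2.filter (fun kv => decide (kv.1 ≤ x))).flatMap (fun kv => kv.2)).filter
      (fun v => dict1.any (fun jv => decide (jv.1 ≤ x) && jv.2.contains v)))

-- ===== PRECONDITION & SPEC =====
def Spec_restaurant (dict1 : List (Int × List String)) (dict2 : List (Int × List String)) (x : Int) (out : List String) : Prop := out = restaurant_alt dict1 dict2 x
instance (dict1 : List (Int × List String)) (dict2 : List (Int × List String)) (x : Int) (out : List String) : Decidable (Spec_restaurant dict1 dict2 x out) := by unfold Spec_restaurant; infer_instance

-- ===== CLAIM (what is proved, stated in full; the proofs are below) =====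
def Claim_equal_restaurant : Prop := ∀ (dict1 : List (Int × List String)) (dict2 : List (Int × List String)) (x : Int), Dom_restaurant dict1 dict2 x → Spec_restaurant dict1 dict2 x (restaurant dict1 dict2 x)

-- ===== LEMMAS AND PROOFS =====

-- A's first loop (add every value of a qualifying key) is Set.update with the flattened qualifying values.
theorem tempLoop_eq (x : Int) (d : List (Int × List String)) (s : PySem.Set String) :
    d.foldl (fun t kv =>
      if kv.1 ≤ x then kv.2.foldl (fun t v => PySem.Set.add t v) t else t) s
    = PySem.Set.update s ((d.filter (fun kv => decide (kv.1 ≤ x))).flatMap (fun kv => kv.2)) := by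
  induction d generalizing s with
  | nil => rfl
  | cons kv d ih =>
    simp only [List.foldl_cons, List.filter_cons]
    by_cases h : kv.1 ≤ x
    · simp only [h, decide_true, ite_true, List.flatMap_cons]
      rw [ih, PySem.Set.update_append]
      rfl
    · simp only [h, decide_false, Bool.false_eq_true, ite_false, ih]

-- A's inner filtering add-loop is Set.update with the filtered list.
theorem filterLoop_eq (temp : PySem.Set String) (L : List String) (s : PySem.Set String) :
    L.foldl (fun f v => if PySem.Set.contains temp v then PySem.Set.add f v else f) s
    = PySem.Set.update s (L.filter (fun v => PySem.Set.contains temp v)) := by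
  induction L generalizing s with
  | nil => rfl
  | cons v L ih =>
    simp only [List.foldl_cons, List.filter_cons]
    cases h : PySem.Set.contains temp v with
    | true => rw [if_pos rfl, if_pos rfl, ih, PySem.Set.update_cons]
    | false => rw [if_neg (by decide), if_neg (by decide), ih]

-- A's second loop over the dict is Set.update with the flattened-then-filtered qualifying values.
theorem finalLoop_eq (x : Int) (temp : PySem.Set String) (d : List (Int × List String)) (s : PySem.Set String) :
    d.foldl (fun f kv =>
      if kv.1 ≤ x then
        kv.2.foldl (fun f v => if PySem.Set.contains temp v then PySem.Set.add f v else f) f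
      else f) s
    = PySem.Set.update s
        (((d.filter (fun kv => decide (kv.1 ≤ x))).flatMap (fun kv => kv.2)).filter
          (fun v => PySem.Set.contains temp v)) := by
  induction d generalizing s with
  | nil => rfl
  | cons kv d ih =>
    simp only [List.foldl_cons, List.filter_cons]
    by_cases h : kv.1 ≤ x
    · simp only [h, decide_true, ite_true, List.flatMap_cons, List.filter_append]
      rw [ih, filterLoop_eq, PySem.Set.update_append]
    · simp only [h, decide_false, Bool.false_eq_true, ite_false, ih]

-- membership in A's temp set = B's direct any() scan of dict1.
theorem containsTemp_eq_any (x : Int) (dict1 : List (Int × List String)) (v : String) :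
    PySem.Set.contains
      (PySem.Set.update PySem.Set.empty
        ((dict1.filter (fun kv => decide (kv.1 ≤ x))).flatMap (fun kv => kv.2))) v
    = dict1.any (fun jv => decide (jv.1 ≤ x) && jv.2.contains v) := by
  rw [PySem.Set.update_empty, Bool.eq_iff_iff, PySem.Set.contains_iff]
  simp only [PySem.Set.mem_ofList, List.mem_flatMap, List.mem_filter, List.any_eq_true,
    decide_eq_true_eq, Bool.and_eq_true, List.contains_iff_mem]
  aesop

-- ===== VERDICT (by name: the statement is the Claim_ definition above) =====
theorem restaurant_spec : Claim_equal_restaurant := by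
  intro dict1 dict2 x _
  show restaurant dict1 dict2 x = restaurant_alt dict1 dict2 x
  unfold restaurant restaurant_alt
  rw [tempLoop_eq, finalLoop_eq]
  rw [PySem.Set.update_empty]
  congr 1
  apply List.filter_congr
  intro v _
  rw [containsTemp_eq_any]
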